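-- pv_equiv track=rewrite | github.com/joshanashakya/dissertation | workspace/dataset/java-python/GeeksForGeeks/1982/A/2.py | kBitDifferencePairs
-- ===== SOURCE A (Python) =====
-- def kBitDifferencePairs(arr, n, k):
--
--     # Get the maximum value among
--     # all array elemensts
--     MAX = max(arr)
--
--     # Set the count array to 0, count[] stores
--     # the total frequency of array elements
--     count = [0 for i in range(MAX + 1)]
--
--     for i in range(n):
--         count[arr[i]] += 1
--
--     # Initialize result
--     ans = 0
--
--     # For 0 bit answer will be total
--     # count of same number
--     if (k == 0):
--         for i in range(MAX + 1):
--             ans += (count[i] * (count[i] - 1)) // 2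
--
--         return ans
--
--
--     for i in range(MAX + 1):
--
--         # if count[i] is 0, skip the next loop
--         # as it will not contribute the answer
--         if (count[i] == 0):
--             continue
--
--         for j in range(i + 1, MAX + 1):
--
--             # Update answer if k differ bit found
--             if (bin(i ^ j).count('1') == k):
--                 ans += count[i] * count[j]
--
--     return ans
-- ===== SOURCE B (Python) =====
-- def _masks(nbits, k):
--     # all subsets of the low `nbits` bit positions with exactly k bits set
--     if k == 0:
--         return [0]
--     if nbits < k:
--         return []
--     return [2 ** (nbits - 1) + m for m in _masks(nbits - 1, k - 1)] + _masks(nbits - 1, k)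
--
--
-- def kBitDifferencePairs(arr, n, k):
--     count = {}
--     for a in range(n):
--         v = arr[a]
--         count[v] = count.get(v, 0) + 1
--     if k == 0:
--         ans = 0
--         for v in count:
--             ans += count[v] * (count[v] - 1) // 2
--         return ans
--     if k < 0:
--         return 0
--     nbits = 0
--     for v in count:
--         nbits = max(nbits, v.bit_length())
--     ans = 0
--     for mask in _masks(nbits, k):
--         for v in count:
--             w = v ^ mask
--             if w > v and w in count:
--                 ans += count[v] * count[w]
--     return ans
-- ===== Notes on version B (the rewrite author's own statement) =====
-- stated objective: faster
-- what changed: A counting-sorts into a dense 0..max(arr) array and scans all O(MAX^2) value pairs testing the popcount of each XOR; B builds a frequency dict of the counted prefix and enumerates only the C(bit_length(max),k) masks with exactly k set bits, looking each partner value v^mask up in the dict.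
-- outside the precondition, e.g. on kBitDifferencePairs([4, 0, 4, -1], 4, 0): A returns 3, B returns 1
import Mathlib
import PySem

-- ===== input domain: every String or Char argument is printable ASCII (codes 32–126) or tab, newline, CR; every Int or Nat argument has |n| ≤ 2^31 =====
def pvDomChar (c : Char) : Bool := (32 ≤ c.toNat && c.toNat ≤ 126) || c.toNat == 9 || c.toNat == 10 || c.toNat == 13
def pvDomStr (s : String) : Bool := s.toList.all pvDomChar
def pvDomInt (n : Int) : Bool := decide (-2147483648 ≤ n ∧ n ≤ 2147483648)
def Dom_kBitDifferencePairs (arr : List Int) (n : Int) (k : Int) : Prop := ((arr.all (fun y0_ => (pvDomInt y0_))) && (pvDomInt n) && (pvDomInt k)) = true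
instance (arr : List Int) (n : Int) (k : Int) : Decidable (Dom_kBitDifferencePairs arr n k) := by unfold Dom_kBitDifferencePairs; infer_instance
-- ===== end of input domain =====

-- B replaces A's O(MAX^2) scan over all value pairs by a frequency dict plus enumeration of the
-- bit masks with exactly k set bits (each mask names the XOR of a matching pair); return values
-- are proved equal on Pre_.

-- ===== PORT A =====

-- Python `c[i]` on the count array (a negative index counts from the end, 0 out of range);
-- exact whenever the index is in range, which Pre_ guarantees (Python raises IndexError there).
-- `Array Int` mirrors a Python list's O(1) indexing.
def pvAGet (c : Array Int) (i : Int) : Int :=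
  if i < 0 then c.getD (i + c.size).toNat 0 else c.getD i.toNat 0

-- Python `c[i] += 1`; exact whenever the index is in range, which Pre_ guarantees
-- (Python raises IndexError out of range; Array.set! is then a no-op).
def pvBump (c : Array Int) (i : Int) : Array Int :=
  let j : Int := if i < 0 then i + c.size else i
  c.set! j.toNat (pvAGet c i + 1)

def kBitDifferencePairs (arr : List Int) (n : Int) (k : Int) : Int :=
  -- MAX = max(arr); Python raises ValueError on [] (excluded by Pre_), the getD 0 is unreachable there
  let MAX : Int := (PySem.List.max? arr id).getD 0
  let count0 : Array Int := ((PySem.List.pyRange 0 (MAX + 1)).map (fun _ => (0 : Int))).toArray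
  let count : Array Int :=
    (PySem.List.pyRange 0 n).foldl (fun c i => pvBump c (PySem.List.pyGetD arr i 0)) count0
  if k = 0 then
    (PySem.List.pyRange 0 (MAX + 1)).foldl
      (fun ans i =>
        ans + PySem.Int.floordiv (pvAGet count i * (pvAGet count i - 1)) 2)
      0
  else
    (PySem.List.pyRange 0 (MAX + 1)).foldl
      (fun ans i =>
        if pvAGet count i = 0 then ans
        else
          (PySem.List.pyRange (i + 1) (MAX + 1)).foldl
            (fun ans j =>
              if (PySem.Int.bitCount (PySem.Int.bxor i j) : Int) = k then
                ans + pvAGet count i * pvAGet count j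
              else ans)
            ans)
      0

-- ===== PORT B =====

-- _masks(nbits, k): subsets of the low `nbits` bit positions with exactly k bits set.
-- (B only ever calls it with k ≥ 0; for k < 0 this returns [] where the Python recursion is never entered.)
def pvMasks (nbits : Nat) (k : Int) : List Int :=
  match nbits with
  | 0 => if k = 0 then [0] else []
  | nb + 1 =>
    if k = 0 then [0]
    else if ((nb : Int) + 1) < k then []
    else ((pvMasks nb (k - 1)).map (fun m => (2 : Int) ^ nb + m)) ++ pvMasks nb k

def kBitDifferencePairs_alt (arr : List Int) (n : Int) (k : Int) : Int :=
  let count : PySem.Dict Int Int :=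
    (PySem.List.pyRange 0 n).foldl
      (fun d a => d.modify (PySem.List.pyGetD arr a 0) 0 (fun c => c + 1)) PySem.Dict.empty
  if k = 0 then
    count.keys.foldl (fun ans v => ans + PySem.Int.floordiv (count.getD v 0 * (count.getD v 0 - 1)) 2) 0
  else if k < 0 then 0
  else
    let nbits : Nat := count.keys.foldl (fun nb v => max nb (PySem.Int.bitLength v)) 0
    (pvMasks nbits k).foldl
      (fun ans mask =>
        count.keys.foldl
          (fun ans v =>
            let w := PySem.Int.bxor v mask
            if w > v then
              match count.get? w with
              | some cw => ans + count.getD v 0 * cw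
              | none => ans
            else ans)
          ans)
      0

-- ===== PRECONDITION & SPEC =====

-- Pre_ keeps the natural domain of A's frequency-array algorithm: a nonempty array, n within range,
-- and nonnegative counted values.  It excludes exactly (a) inputs where A raises (empty arr:
-- ValueError; n > len(arr) or a counted value below -(max(arr)+1): IndexError) and (b) inputs with a
-- negative counted value in [-(max(arr)+1), -1], where A's `count[arr[i]] += 1` silently folds the
-- value into index max(arr)+1+arr[i] via Python's negative-index wraparound.
def Pre_kBitDifferencePairs (arr : List Int) (n : Int) (k : Int) : Prop :=
  arr ≠ [] ∧ n ≤ (arr.length : Int) ∧ ∀ e ∈ arr.take n.toNat, 0 ≤ e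

instance (arr : List Int) (n : Int) (k : Int) : Decidable (Pre_kBitDifferencePairs arr n k) := by
  unfold Pre_kBitDifferencePairs; infer_instance

def pvWitness_kBitDifferencePairs : List Int × Int × Int := ([1, 2, 3, 2], 4, 1)

def Spec_kBitDifferencePairs (arr : List Int) (n : Int) (k : Int) (out : Int) : Prop :=
  out = kBitDifferencePairs_alt arr n k
instance (arr : List Int) (n : Int) (k : Int) (out : Int) : Decidable (Spec_kBitDifferencePairs arr n k out) := by
  unfold Spec_kBitDifferencePairs; infer_instance

-- ===== CLAIM (what is proved, stated in full; the proofs are below) =====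
def Claim_equal_kBitDifferencePairs : Prop :=
  ∀ (arr : List Int) (n : Int) (k : Int), Dom_kBitDifferencePairs arr n k →
    Pre_kBitDifferencePairs arr n k →
    Spec_kBitDifferencePairs arr n k (kBitDifferencePairs arr n k)


-- ── generic loop/list helpers ──────────────────────────────────────────────

-- a foldl over `range(a, n)` reading xs[j] is a structural foldl over the prefix slice
theorem pv_foldl_take_aux {α β : Type} (xs : List α) (d : α) (f : β → α → β) (n : Int)
    (h : n ≤ (xs.length : Int)) :
    ∀ (m : Nat) (a : Nat) (init : β), (n - a).toNat ≤ m →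
      (PySem.List.pyRange a n).foldl (fun acc j => f acc (PySem.List.pyGetD xs j d)) init
        = ((xs.take n.toNat).drop a).foldl f init := by
  intro m
  induction m with
  | zero =>
    intro a init hm
    have hna : n ≤ (a : Int) := by omega
    have hr : PySem.List.pyRange (a : Int) n = [] := by
      apply List.eq_nil_iff_forall_not_mem.mpr
      intro x hx
      rw [PySem.List.mem_pyRange_one] at hx
      omega
    have hd : ((xs.take n.toNat).drop a) = [] := by
      apply List.drop_eq_nil_of_le
      simp only [List.length_take]
      omega
    rw [hr, hd]
    rfl
  | succ m ih =>
    intro a init hm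
    by_cases hlt : (a : Int) < n
    · have ha : a < n.toNat := by omega
      have halen : a < xs.length := by omega
      rw [PySem.List.pyRange_one_cons hlt]
      simp only [List.foldl]
      have hget : PySem.List.pyGetD xs (a : Int) d = xs[a] := by
        rw [PySem.List.pyGetD_eq_getElem xs d (by positivity) (by exact_mod_cast halen)]
        simp
      have hdrop : ((xs.take n.toNat).drop a) = xs[a] :: ((xs.take n.toNat).drop (a + 1)) := by
        rw [List.drop_eq_getElem_cons (by simp; omega)]
        simp [List.getElem_take]
      rw [hget, hdrop]
      simp only [List.foldl_cons]
      have := ih (a + 1) (f init xs[a]) (by omega)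
      rw [← this]
      norm_num
    · have hr : PySem.List.pyRange (a : Int) n = [] := by
        apply List.eq_nil_iff_forall_not_mem.mpr
        intro x hx
        rw [PySem.List.mem_pyRange_one] at hx
        omega
      have hd : ((xs.take n.toNat).drop a) = [] := by
        apply List.drop_eq_nil_of_le
        simp only [List.length_take]
        omega
      rw [hr, hd]
      rfl

theorem pv_foldl_take {α β : Type} (xs : List α) (d : α) (f : β → α → β) (init : β) (n : Int)
    (h : n ≤ (xs.length : Int)) :
    (PySem.List.pyRange 0 n).foldl (fun acc j => f acc (PySem.List.pyGetD xs j d)) init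
      = (xs.take n.toNat).foldl f init := by
  have := pv_foldl_take_aux xs d f n h (n - 0).toNat 0 init (le_refl _)
  simpa using this

-- sum of a function over `range(a, b)` as a Finset.Ico sum
theorem pv_sum_pyRange (f : Int → Int) (a b : Int) :
    ((PySem.List.pyRange a b).map f).sum = ∑ j ∈ Finset.Ico a b, f j := by
  have main : ∀ (m : Nat) (a : Int), (b - a).toNat ≤ m →
      ((PySem.List.pyRange a b).map f).sum = ∑ j ∈ Finset.Ico a b, f j := by
    intro m
    induction m with
    | zero =>
      intro a hm
      have hr : PySem.List.pyRange a b = [] := by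
        apply List.eq_nil_iff_forall_not_mem.mpr
        intro x hx; rw [PySem.List.mem_pyRange_one] at hx; omega
      have hi : Finset.Ico a b = ∅ := Finset.Ico_eq_empty (by omega)
      rw [hr, hi]; simp
    | succ m ih =>
      intro a hm
      by_cases hlt : a < b
      · rw [PySem.List.pyRange_one_cons hlt]
        have hins : Finset.Ico a b = insert a (Finset.Ico (a + 1) b) := by
          ext x; simp only [Finset.mem_Ico, Finset.mem_insert]; omega
        rw [hins, Finset.sum_insert (by simp)]
        simp only [List.map_cons, List.sum_cons]
        rw [ih (a + 1) (by omega)]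
      · have hr : PySem.List.pyRange a b = [] := by
          apply List.eq_nil_iff_forall_not_mem.mpr
          intro x hx; rw [PySem.List.mem_pyRange_one] at hx; omega
        have hi : Finset.Ico a b = ∅ := Finset.Ico_eq_empty (by omega)
        rw [hr, hi]; simp
  exact main (b - a).toNat a (le_refl _)

-- getD of a list of zeros
theorem pv_getD_zeros {α : Type} (l : List α) (i : Nat) :
    (l.map (fun _ => (0 : Int))).getD i 0 = 0 := by
  simp only [List.getD, List.getElem?_map]
  cases l[i]? <;> simp

theorem pv_getD_set (l : List Int) (j : Nat) (v : Int) (i : Nat) (hj : j < l.length) :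
    (l.set j v).getD i 0 = if i = j then v else l.getD i 0 := by
  simp only [List.getD, List.getElem?_set]
  split <;> rename_i hij
  · subst hij; simp [hj]
  · rw [if_neg (by omega)]

-- ── the count array built by A ─────────────────────────────────────────────

-- proof-side List twin of the Array-based pvBump
def pvBumpL (c : List Int) (i : Int) : List Int :=
  let j : Int := if i < 0 then i + c.length else i
  c.set j.toNat (PySem.List.pyGetD c i 0 + 1)

theorem pv_agetD (a : Array Int) (i : Nat) (d : Int) : a.getD i d = a.toList.getD i d := by
  simp only [Array.getD, List.getD]
  rcases lt_or_ge i a.size with h | h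
  · simp [h]
  · simp [h]

theorem pv_aget_eq (c : Array Int) (i : Int) (h : 0 ≤ i) :
    pvAGet c i = c.toList.getD i.toNat 0 := by
  rw [pvAGet, if_neg (by omega), pv_agetD]

theorem pv_bump_toList (c : Array Int) (x : Int) (h : 0 ≤ x) :
    (pvBump c x).toList = pvBumpL c.toList x := by
  simp only [pvBump, pvBumpL, Array.set!]
  rw [if_neg (by omega), if_neg (by omega), Array.toList_setIfInBounds]
  rw [pv_aget_eq c x h, PySem.List.pyGetD_of_nonneg _ _ h]

theorem pv_foldA (xs : List Int) (h : ∀ x ∈ xs, 0 ≤ x) :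
    ∀ (cA : Array Int), (xs.foldl pvBump cA).toList = xs.foldl pvBumpL cA.toList := by
  induction xs with
  | nil => intro cA; rfl
  | cons x t ih =>
    intro cA
    simp only [List.foldl_cons]
    rw [← pv_bump_toList cA x (h x (by simp))]
    exact ih (fun y hy => h y (by simp [hy])) (pvBump cA x)

theorem pv_bump_length (c : List Int) (x : Int) : (pvBumpL c x).length = c.length := by
  simp [pvBumpL]

theorem pv_bump_getD (c : List Int) (x : Int) (hx : 0 ≤ x) (hlt : x.toNat < c.length)
    (i : Nat) :
    (pvBumpL c x).getD i 0 = c.getD i 0 + (if (i : Int) = x then 1 else 0) := by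
  have hb : pvBumpL c x = c.set x.toNat (c.getD x.toNat 0 + 1) := by
    simp only [pvBumpL]
    rw [if_neg (by omega), PySem.List.pyGetD_of_nonneg c 0 hx]
  rw [hb, pv_getD_set c x.toNat _ i hlt]
  by_cases hi : i = x.toNat
  · subst hi
    rw [if_pos rfl, if_pos (by omega)]
  · rw [if_neg hi, if_neg (by omega)]
    omega

theorem pv_count_build (xs : List Int) :
    ∀ (c : List Int), (∀ x ∈ xs, 0 ≤ x ∧ x.toNat < c.length) →
      ((xs.foldl pvBumpL c).length = c.length ∧
        ∀ (i : Nat), (xs.foldl pvBumpL c).getD i 0 = c.getD i 0 + xs.count (i : Int)) := by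
  induction xs with
  | nil => intro c _; simp
  | cons x t ih =>
    intro c hc
    obtain ⟨hx0, hxl⟩ := hc x (by simp)
    have hct : ∀ y ∈ t, 0 ≤ y ∧ y.toNat < (pvBumpL c x).length := by
      intro y hy
      rw [pv_bump_length]
      exact hc y (by simp [hy])
    obtain ⟨hlen, hval⟩ := ih (pvBumpL c x) hct
    constructor
    · simp only [List.foldl_cons]
      rw [hlen, pv_bump_length]
    · intro i
      simp only [List.foldl_cons]
      rw [hval i, pv_bump_getD c x hx0 hxl i]
      rw [List.count_cons]
      by_cases h : ((i : Nat) : Int) = x <;> simp [h, Ne.symm] <;> omega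

-- ── bit-counting facts ─────────────────────────────────────────────────────

theorem pv_bitCount_cast_pos (m : Nat) (h : 0 < m) : 0 < PySem.Int.bitCount (m : Int) := by
  induction m using Nat.strong_induction_on with
  | _ m ih =>
    rw [PySem.Int.bitCount_natCast h]
    rcases Nat.mod_two_eq_zero_or_one m with h2 | h2
    · have hm2 : 0 < m / 2 := by omega
      have := ih (m / 2) (by omega) hm2
      omega
    · omega

theorem pv_bitCount_two_pow_add (b : Nat) :
    ∀ (r : Nat), r < 2 ^ b →
      PySem.Int.bitCount ((2 ^ b + r : Nat) : Int) = PySem.Int.bitCount (r : Int) + 1 := by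
  induction b with
  | zero =>
    intro r hr
    interval_cases r
    decide
  | succ b ih =>
    intro r hr
    have hpos : 0 < 2 ^ (b + 1) + r := by positivity
    rw [PySem.Int.bitCount_natCast hpos]
    have hP : (2 : Nat) ^ (b + 1) = 2 * 2 ^ b := by ring
    have hdiv : (2 ^ (b + 1) + r) / 2 = 2 ^ b + r / 2 := by omega
    have hmod : (2 ^ (b + 1) + r) % 2 = r % 2 := by omega
    have hr2 : r / 2 < 2 ^ b := by omega
    rw [hdiv, hmod, ih (r / 2) hr2]
    rcases Nat.eq_zero_or_pos r with hz | hp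
    · subst hz; simp
    · rw [PySem.Int.bitCount_natCast hp]
      omega

theorem pv_bitLength_le (m : Int) (b : Nat) (h : m.natAbs < 2 ^ b) :
    PySem.Int.bitLength m ≤ b := by
  by_contra hc
  push_neg at hc
  rcases eq_or_ne m 0 with rfl | hm
  · simp [PySem.Int.bitLength_zero] at hc
  · have h1 := PySem.Int.two_pow_bitLength_le m hm
    have h2 : 2 ^ b ≤ 2 ^ (PySem.Int.bitLength m - 1) :=
      Nat.pow_le_pow_right (by omega) (by omega)
    omega

-- ── the mask list built by B ───────────────────────────────────────────────

theorem pv_masks_neg : ∀ (nb : Nat) (k : Int), k < 0 → pvMasks nb k = [] := by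
  intro nb
  induction nb with
  | zero =>
    intro k hk
    rw [show pvMasks 0 k = if k = 0 then [0] else [] from rfl, if_neg (by omega)]
  | succ nb ih =>
    intro k hk
    simp only [pvMasks]
    rw [if_neg (by omega), if_neg (by omega), ih (k - 1) (by omega), ih k hk]
    simp

theorem pv_masks_mem : ∀ (nb : Nat) (k : Int), 0 ≤ k → ∀ (m : Int),
    (m ∈ pvMasks nb k ↔ 0 ≤ m ∧ m.natAbs < 2 ^ nb ∧ (PySem.Int.bitCount m : Int) = k) := by
  intro nb
  induction nb with
  | zero =>
    intro k hk m
    by_cases hk0 : k = 0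
    · subst hk0
      rw [show pvMasks 0 0 = [0] from rfl]
      simp only [List.mem_singleton]
      constructor
      · rintro rfl; exact ⟨le_refl _, by simp, by decide⟩
      · rintro ⟨h0, h1, h2⟩; omega
    · rw [show pvMasks 0 k = if k = 0 then [0] else [] from rfl, if_neg hk0]
      simp only [List.not_mem_nil, false_iff]
      rintro ⟨h0, h1, h2⟩
      have hm0 : m = 0 := by omega
      subst hm0
      rw [show PySem.Int.bitCount (0 : Int) = 0 from by decide] at h2
      omega
  | succ nb ih =>
    intro k hk m
    by_cases hk0 : k = 0
    · subst hk0
      rw [show pvMasks (nb + 1) 0 = [0] from rfl]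
      simp only [List.mem_singleton]
      constructor
      · rintro rfl
        exact ⟨le_refl _, by simpa using Nat.two_pow_pos (nb + 1), by decide⟩
      · rintro ⟨h0, h1, h2⟩
        by_contra hm
        have hmp : 0 < m.toNat := by omega
        have := pv_bitCount_cast_pos m.toNat hmp
        rw [Int.toNat_of_nonneg h0] at this
        omega
    · rw [show pvMasks (nb + 1) k
            = if k = 0 then [0]
              else if ((nb : Int) + 1) < k then []
              else ((pvMasks nb (k - 1)).map (fun m => (2 : Int) ^ nb + m)) ++ pvMasks nb k from rfl,
          if_neg hk0]
      by_cases hbig : ((nb : Int) + 1) < k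
      · rw [if_pos hbig]
        simp only [List.not_mem_nil, false_iff]
        rintro ⟨h0, h1, h2⟩
        have hle : PySem.Int.bitCount m ≤ PySem.Int.bitLength m := PySem.Int.bitCount_le_bitLength m
        have := pv_bitLength_le m (nb + 1) h1
        omega
      · rw [if_neg hbig]
        have hk1 : (0 : Int) ≤ k - 1 := by omega
        simp only [List.mem_append, List.mem_map]
        constructor
        · rintro (⟨m', hm', rfl⟩ | hm)
          · obtain ⟨h0, h1, h2⟩ := (ih (k - 1) hk1 m').mp hm'
            have hcast : (2 : Int) ^ nb + m' = ((2 ^ nb + m'.toNat : Nat) : Int) := by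
              push_cast
              rw [Int.toNat_of_nonneg h0]
            have hna : m'.natAbs = m'.toNat := Int.natAbs_of_nonneg h0 ▸ rfl
            refine ⟨by positivity, ?_, ?_⟩
            · rw [hcast]
              simp only [Int.natAbs_natCast]
              have : m'.toNat < 2 ^ nb := by omega
              calc 2 ^ nb + m'.toNat < 2 ^ nb + 2 ^ nb := by omega
                _ = 2 ^ (nb + 1) := by ring
            · rw [hcast, pv_bitCount_two_pow_add nb m'.toNat (by omega)]
              rw [Int.toNat_of_nonneg h0] at *
              push_cast
              omega
          · obtain ⟨h0, h1, h2⟩ := (ih k hk m).mp hm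
            exact ⟨h0, by calc m.natAbs < 2 ^ nb := h1
                            _ ≤ 2 ^ (nb + 1) := by omega, h2⟩
        · rintro ⟨h0, h1, h2⟩
          by_cases hsm : m.natAbs < 2 ^ nb
          · right
            exact (ih k hk m).mpr ⟨h0, hsm, h2⟩
          · left
            have hna : m.natAbs = m.toNat := by omega
            have hcast : ((2 ^ nb : Nat) : Int) = (2 : Int) ^ nb := by push_cast; ring
            have hP : (2 : Nat) ^ (nb + 1) = 2 * 2 ^ nb := by ring
            set r : Nat := m.toNat - 2 ^ nb with hr
            have hrlt : r < 2 ^ nb := by omega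
            have hmr : m = ((2 ^ nb + r : Nat) : Int) := by push_cast; omega
            refine ⟨(r : Int), ?_, ?_⟩
            · apply (ih (k - 1) hk1 (r : Int)).mpr
              refine ⟨by positivity, by simpa using hrlt, ?_⟩
              rw [hmr, pv_bitCount_two_pow_add nb r hrlt] at h2
              push_cast at h2
              omega
            · rw [hmr]; push_cast; omega

theorem pv_masks_nodup : ∀ (nb : Nat) (k : Int), (pvMasks nb k).Nodup := by
  intro nb
  induction nb with
  | zero =>
    intro k
    simp only [pvMasks]
    split <;> simp
  | succ nb ih =>
    intro k
    rcases lt_or_ge k 0 with hneg | hk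
    · rw [pv_masks_neg _ k hneg]; simp
    · simp only [pvMasks]
      split
      · simp
      · split
        · simp
        · rename_i hk0 hbig
          refine List.Nodup.append ?_ (ih k) ?_
          · refine List.Nodup.map ?_ (ih (k - 1))
            intro a b hab
            exact add_left_cancel hab
          · intro x hx1 hx2
            simp only [List.mem_map] at hx1
            obtain ⟨m', hm', rfl⟩ := hx1
            obtain ⟨h0', _, _⟩ := (pv_masks_mem nb (k - 1) (by omega) m').mp hm'
            obtain ⟨h0, h1, _⟩ := (pv_masks_mem nb k hk _).mp hx2
            have hcast : ((2 ^ nb : Nat) : Int) = (2 : Int) ^ nb := by push_cast; ring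
            omega

-- ── dictionary facts (B's counter) ─────────────────────────────────────────

theorem pv_get?_mem_keys {d : PySem.Dict Int Int} {w : Int} {cw : Int}
    (h : d.get? w = some cw) : w ∈ d.keys := by
  simp only [PySem.Dict.get?] at h
  rcases hf : List.find? (fun p => p.1 == w) d.items with _ | p
  · rw [hf] at h; simp at h
  · have hp := List.find?_some hf
    have hmem := List.mem_of_find?_eq_some hf
    simp only [beq_iff_eq] at hp
    simp only [PySem.Dict.keys, List.mem_map]
    exact ⟨p, hmem, hp⟩

theorem pv_counter_get?_of_not_mem (xs : List Int) (w : Int) (h : w ∉ xs) :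
    (PySem.Dict.counter xs).get? w = none := by
  rcases hg : (PySem.Dict.counter xs).get? w with _ | cw
  · rfl
  · exfalso
    have := pv_get?_mem_keys hg
    rw [PySem.Dict.keys_counter] at this
    exact h ((PySem.Set.mem_ofList xs w).mp this)

theorem pv_counter_get?_of_mem (xs : List Int) (w : Int) (h : w ∈ xs) :
    (PySem.Dict.counter xs).get? w = some ((xs.count w : Nat) : Int) := by
  have hd := PySem.Dict.getD_counter xs w
  rcases hg : (PySem.Dict.counter xs).get? w with _ | cw
  · exfalso
    simp only [PySem.Dict.getD, hg, Option.getD_none] at hd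
    have : xs.count w ≠ 0 := by
      rw [← List.count_pos_iff] at h
      omega
    omega
  · simp only [PySem.Dict.getD, hg, Option.getD_some] at hd
    rw [hd]

-- ── small helpers ──────────────────────────────────────────────────────────

theorem pv_pyRange_nil {a b : Int} (h : b ≤ a) : PySem.List.pyRange a b = [] := by
  apply List.eq_nil_iff_forall_not_mem.mpr
  intro x hx
  rw [PySem.List.mem_pyRange_one] at hx
  omega

theorem pv_max?_isSome (xs : List Int) (h : xs ≠ []) :
    ∃ m, PySem.List.max? xs id = some m := by
  have aux : ∀ (f : Option Int → Int → Option Int),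
      (∀ (m x : Int), ∃ m', f (some m) x = some m') →
      ∀ (t : List Int) (m : Int), ∃ m', List.foldl f (some m) t = some m' := by
    intro f hf t
    induction t with
    | nil => intro m; exact ⟨m, rfl⟩
    | cons y ty ih =>
      intro m
      rw [List.foldl_cons]
      obtain ⟨m', hm'⟩ := hf m y
      rw [hm']
      exact ih m'
  cases xs with
  | nil => simp at h
  | cons x t =>
    simp only [PySem.List.max?, List.foldl_cons]
    exact aux _ (fun m x => by
      show ∃ m', (if id m < id x then some x else some m) = some m'
      split
      · exact ⟨x, rfl⟩
      · exact ⟨m, rfl⟩) t x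

-- value-multiplicity in the counted prefix
def pvC (xs : List Int) (v : Int) : Int := ((xs.count v : Nat) : Int)

theorem pv_main (arr : List Int) (n : Int) (k : Int)
    (hne : arr ≠ []) (hlen : n ≤ (arr.length : Int))
    (hpos : ∀ e ∈ arr.take n.toNat, 0 ≤ e) :
    kBitDifferencePairs arr n k = kBitDifferencePairs_alt arr n k := by
  obtain ⟨M, hM⟩ := pv_max?_isSome arr hne
  have hMmax : ∀ y ∈ arr, y ≤ M := by
    have := PySem.List.max?_isMax hM
    simpa using this
  set xs := arr.take n.toNat with hxs
  have hxsb : ∀ x ∈ xs, 0 ≤ x ∧ x ≤ M :=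
    fun x hx => ⟨hpos x hx, hMmax x (List.take_subset _ _ hx)⟩
  simp only [kBitDifferencePairs, kBitDifferencePairs_alt, hM, Option.getD_some]
  rw [pv_foldl_take arr 0 pvBump _ n hlen,
      pv_foldl_take arr 0 (fun d v => PySem.Dict.modify d v 0 (fun c => c + 1)) _ n hlen,
      show (arr.take n.toNat).foldl (fun d v => PySem.Dict.modify d v 0 (fun c => c + 1)) PySem.Dict.empty
         = PySem.Dict.counter (arr.take n.toNat) from rfl]
  rw [← hxs]
  by_cases hM0 : M + 1 ≤ 0
  · -- degenerate: every counted value would be negative, so the prefix is empty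
    have hxsnil : xs = [] := by
      apply List.eq_nil_iff_forall_not_mem.mpr
      intro x hx
      obtain ⟨h1, h2⟩ := hxsb x hx
      omega
    rw [hxsnil]
    rw [pv_pyRange_nil hM0]
    simp only [List.map_nil, List.foldl_nil]
    have hkeys : (PySem.Dict.counter ([] : List Int)).keys = [] := rfl
    rw [hkeys]
    simp only [List.foldl_nil]
    by_cases hk0 : k = 0
    · rw [if_pos hk0, if_pos hk0]
    · rw [if_neg hk0, if_neg hk0]
      by_cases hkn : k < 0
      · rw [if_pos hkn]
      · rw [if_neg hkn, show pvMasks 0 k = if k = 0 then [0] else [] from rfl, if_neg hk0]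
        rfl
  · -- main case: 0 ≤ M
    have hM0' : (0 : Int) ≤ M := by omega
    set count0 : List Int := (PySem.List.pyRange 0 (M + 1)).map (fun _ => (0 : Int)) with hc0
    have hc0len : count0.length = (M + 1).toNat := by
      rw [hc0, show (M + 1 : Int) = (((M + 1).toNat : Nat) : Int) from by omega,
          PySem.List.pyRange_zero_natCast]
      simp
      omega
    have hbounds : ∀ x ∈ xs, 0 ≤ x ∧ x.toNat < count0.length := by
      intro x hx
      obtain ⟨h1, h2⟩ := hxsb x hx
      exact ⟨h1, by omega⟩
    obtain ⟨hblen, hbval⟩ := pv_count_build xs count0 hbounds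
    have hxs0 : ∀ x ∈ xs, 0 ≤ x := fun x hx => (hxsb x hx).1
    have hread : ∀ i : Int, 0 ≤ i →
        pvAGet (xs.foldl pvBump count0.toArray) i = pvC xs i := by
      intro i h0
      rw [pv_aget_eq _ i h0, pv_foldA xs hxs0 count0.toArray,
          show (count0.toArray).toList = count0 from by simp]
      rw [hbval i.toNat, hc0]
      rw [pv_getD_zeros, Int.toNat_of_nonneg h0]
      simp [pvC]
    have hknd : (PySem.Set.ofList xs).Nodup := PySem.Set.nodup_ofList xs
    have hksub : (PySem.Set.ofList xs).toFinset ⊆ Finset.Ico 0 (M + 1) := by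
      intro v hv
      rw [List.mem_toFinset, PySem.Set.mem_ofList] at hv
      obtain ⟨h1, h2⟩ := hxsb v hv
      rw [Finset.mem_Ico]
      omega
    by_cases hk0 : k = 0
    · -- k == 0 branch
      rw [if_pos hk0, if_pos hk0]
      rw [PySem.List.foldl_congr_mem _ _
            (fun ans i => ans + PySem.Int.floordiv (pvC xs i * (pvC xs i - 1)) 2) 0
            (by
              intro acc i hi
              rw [hread i (PySem.List.mem_pyRange_one.mp hi).1])]
      rw [PySem.List.foldl_add _ (fun i => PySem.Int.floordiv (pvC xs i * (pvC xs i - 1)) 2) 0]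
      rw [pv_sum_pyRange (fun i => PySem.Int.floordiv (pvC xs i * (pvC xs i - 1)) 2) 0 (M + 1)]
      rw [PySem.Dict.keys_counter]
      rw [PySem.List.foldl_congr_mem _ _
            (fun ans v => ans + PySem.Int.floordiv (pvC xs v * (pvC xs v - 1)) 2) 0
            (by
              intro acc v hv
              rw [PySem.Dict.getD_counter]
              rfl)]
      rw [PySem.List.foldl_add _ (fun v => PySem.Int.floordiv (pvC xs v * (pvC xs v - 1)) 2) 0]
      rw [← List.sum_toFinset _ hknd]
      rw [zero_add, zero_add]
      rw [← Finset.sum_subset hksub (by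
        intro i hi hni
        have hnxs : i ∉ xs := by
          rw [List.mem_toFinset, PySem.Set.mem_ofList] at hni
          exact hni
        have : pvC xs i = 0 := by
          simp [pvC, List.count_eq_zero_of_not_mem hnxs]
        rw [this]
        decide)]
    · rw [if_neg hk0, if_neg hk0]
      by_cases hkn : k < 0
      · -- negative k: no pair matches on either side
        rw [if_pos hkn]
        rw [PySem.List.foldl_congr_mem _ _ (fun (a : Int) (_ : Int) => a) 0
              (by
                intro acc i hi
                rw [PySem.List.foldl_congr_mem _ _ (fun (a : Int) (_ : Int) => a) acc
                      (by
                        intro acc' j hj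
                        rw [if_neg (by
                          have : (0 : Int) ≤ (PySem.Int.bitCount (PySem.Int.bxor i j) : Int) := by positivity
                          omega)])]
                rw [List.foldl_fixed, ite_self])]
        rw [List.foldl_fixed]
      · -- k > 0: the main branch
        rw [if_neg hkn, PySem.Dict.keys_counter]
        have hknn : (0 : Int) ≤ k := by omega
        set ks := PySem.Set.ofList xs with hksdef
        have hksmem : ∀ v, v ∈ ks ↔ v ∈ xs := fun v => PySem.Set.mem_ofList xs v
        set nbits := ks.foldl (fun nb v => max nb (PySem.Int.bitLength v)) 0 with hnb
        have hbit : ∀ v ∈ ks, v.natAbs < 2 ^ nbits := by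
          intro v hv
          have h1 : PySem.Int.bitLength v ≤ nbits := by
            rw [hnb, ← List.foldl_map]
            exact (PySem.List.le_foldl_max (ks.map PySem.Int.bitLength) 0).2 _
              (List.mem_map_of_mem hv)
          calc v.natAbs < 2 ^ PySem.Int.bitLength v := PySem.Int.lt_two_pow_bitLength v
            _ ≤ 2 ^ nbits := Nat.pow_le_pow_right (by omega) h1
        have hxor0 : ∀ a b : Int, 0 ≤ a → 0 ≤ b → 0 ≤ PySem.Int.bxor a b := by
          intro a b ha hb
          rw [PySem.Int.bxor_of_nonneg ha hb]
          positivity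
        have hxorc : ∀ a b : Int, 0 ≤ a → 0 ≤ b →
            PySem.Int.bxor a (PySem.Int.bxor a b) = b := by
          intro a b ha hb
          rw [PySem.Int.bxor_of_nonneg ha hb,
              PySem.Int.bxor_of_nonneg ha (by positivity)]
          simp [Nat.xor_xor_cancel_left, Int.toNat_of_nonneg hb]
        set E : Finset (Int × Int) :=
          (ks.toFinset ×ˢ ks.toFinset).filter
            (fun p => p.1 < p.2 ∧ ((PySem.Int.bitCount (PySem.Int.bxor p.1 p.2) : Nat) : Int) = k)
          with hE
        -- ── A side ──
        have hAside :
            (PySem.List.pyRange 0 (M + 1)).foldl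
              (fun ans i =>
                if pvAGet (xs.foldl pvBump count0.toArray) i = 0 then ans
                else
                  (PySem.List.pyRange (i + 1) (M + 1)).foldl
                    (fun ans j =>
                      if ((PySem.Int.bitCount (PySem.Int.bxor i j) : Nat) : Int) = k then
                        ans + pvAGet (xs.foldl pvBump count0.toArray) i *
                          pvAGet (xs.foldl pvBump count0.toArray) j
                      else ans)
                    ans)
              0 = ∑ p ∈ E, pvC xs p.1 * pvC xs p.2 := by
          rw [PySem.List.foldl_congr_mem _ _
                (fun ans i => ans + ∑ j ∈ Finset.Ico (i + 1) (M + 1),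
                  (if ((PySem.Int.bitCount (PySem.Int.bxor i j) : Nat) : Int) = k then
                    pvC xs i * pvC xs j else 0)) 0
                (by
                  intro acc i hi
                  dsimp only
                  obtain ⟨hi0, hiM⟩ := PySem.List.mem_pyRange_one.mp hi
                  rw [PySem.List.foldl_congr_mem _ _
                        (fun ans j => ans +
                          (if ((PySem.Int.bitCount (PySem.Int.bxor i j) : Nat) : Int) = k then
                            pvC xs i * pvC xs j else 0)) acc
                        (by
                          intro acc' j hj
                          dsimp only
                          obtain ⟨hj0, hjM⟩ := PySem.List.mem_pyRange_one.mp hj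
                          rw [hread i hi0, hread j (by omega)]
                          split_ifs with h
                          · rfl
                          · exact (add_zero acc').symm)]
                  rw [PySem.List.foldl_add _
                        (fun j => (if ((PySem.Int.bitCount (PySem.Int.bxor i j) : Nat) : Int) = k then
                          pvC xs i * pvC xs j else 0)) acc,
                      pv_sum_pyRange _ (i + 1) (M + 1)]
                  rw [hread i hi0]
                  by_cases hc : pvC xs i = 0
                  · rw [if_pos hc]
                    have hz : ∑ j ∈ Finset.Ico (i + 1) (M + 1),
                        (if ((PySem.Int.bitCount (PySem.Int.bxor i j) : Nat) : Int) = k then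
                          pvC xs i * pvC xs j else 0) = 0 := by
                      apply Finset.sum_eq_zero
                      intro j _
                      rw [hc]
                      split_ifs <;> ring
                    rw [hz, add_zero]
                  · rw [if_neg hc])]
          rw [PySem.List.foldl_add _
                (fun i => ∑ j ∈ Finset.Ico (i + 1) (M + 1),
                  (if ((PySem.Int.bitCount (PySem.Int.bxor i j) : Nat) : Int) = k then
                    pvC xs i * pvC xs j else 0)) 0,
              pv_sum_pyRange _ 0 (M + 1), zero_add]
          -- inner Ico as a filtered full range
          have h1 : ∀ i ∈ Finset.Ico (0 : Int) (M + 1),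
              (∑ j ∈ Finset.Ico (i + 1) (M + 1),
                (if ((PySem.Int.bitCount (PySem.Int.bxor i j) : Nat) : Int) = k then
                  pvC xs i * pvC xs j else 0))
              = ∑ j ∈ Finset.Ico (0 : Int) (M + 1),
                (if i < j ∧ ((PySem.Int.bitCount (PySem.Int.bxor i j) : Nat) : Int) = k then
                  pvC xs i * pvC xs j else 0) := by
            intro i hi
            obtain ⟨hi0, hiM⟩ := Finset.mem_Ico.mp hi
            have hfil : Finset.Ico (i + 1) (M + 1)
                = (Finset.Ico (0 : Int) (M + 1)).filter (fun j => i < j) := by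
              ext j
              simp only [Finset.mem_Ico, Finset.mem_filter]
              omega
            rw [hfil, Finset.sum_filter]
            apply Finset.sum_congr rfl
            intro j _
            split_ifs with h1 h2 h3 <;> first | rfl | (exfalso; tauto)
          rw [Finset.sum_congr rfl h1, ← Finset.sum_product']
          rw [show (∑ p ∈ Finset.Ico (0:Int) (M+1) ×ˢ Finset.Ico (0:Int) (M+1),
                (if p.1 < p.2 ∧ ((PySem.Int.bitCount (PySem.Int.bxor p.1 p.2) : Nat) : Int) = k then
                  pvC xs p.1 * pvC xs p.2 else 0))
              = ∑ p ∈ (Finset.Ico (0:Int) (M+1) ×ˢ Finset.Ico (0:Int) (M+1)).filter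
                  (fun p => p.1 < p.2 ∧ ((PySem.Int.bitCount (PySem.Int.bxor p.1 p.2) : Nat) : Int) = k),
                  pvC xs p.1 * pvC xs p.2 from (Finset.sum_filter _ _).symm]
          symm
          apply Finset.sum_subset
          · intro p hp
            rw [hE, Finset.mem_filter] at hp
            obtain ⟨hpp, hq⟩ := hp
            rw [Finset.mem_product] at hpp
            rw [Finset.mem_filter, Finset.mem_product]
            exact ⟨⟨hksub hpp.1, hksub hpp.2⟩, hq⟩
          · intro p hp hnp
            rw [Finset.mem_filter] at hp
            rw [hE, Finset.mem_filter, Finset.mem_product] at hnp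
            have : p.1 ∉ xs ∨ p.2 ∉ xs := by
              by_contra hcon
              push_neg at hcon
              exact hnp ⟨⟨List.mem_toFinset.mpr ((hksmem p.1).mpr hcon.1),
                List.mem_toFinset.mpr ((hksmem p.2).mpr hcon.2)⟩, hp.2⟩
            rcases this with h | h <;>
              simp [pvC, List.count_eq_zero_of_not_mem h]
        rw [hAside]
        symm
        rw [PySem.List.foldl_congr_mem _ _
              (fun ans mask => ans + ∑ v ∈ ks.toFinset,
                (if v < PySem.Int.bxor v mask ∧ PySem.Int.bxor v mask ∈ xs then
                  pvC xs v * pvC xs (PySem.Int.bxor v mask) else 0)) 0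
              (by
                intro acc mask _
                dsimp only
                rw [PySem.List.foldl_congr_mem _ _
                      (fun ans v => ans +
                        (if v < PySem.Int.bxor v mask ∧ PySem.Int.bxor v mask ∈ xs then
                          pvC xs v * pvC xs (PySem.Int.bxor v mask) else 0)) acc
                      (by
                        intro acc' v _
                        dsimp only
                        by_cases hw : PySem.Int.bxor v mask ∈ xs
                        · rw [pv_counter_get?_of_mem xs _ hw]
                          by_cases hlt : v < PySem.Int.bxor v mask
                          · rw [if_pos hlt, if_pos ⟨hlt, hw⟩, PySem.Dict.getD_counter]
                            rfl
                          · rw [if_neg hlt, if_neg (by tauto), add_zero]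
                        · rw [pv_counter_get?_of_not_mem xs _ hw]
                          by_cases hlt : v < PySem.Int.bxor v mask
                          · rw [if_pos hlt, if_neg (by tauto), add_zero]
                          · rw [if_neg hlt, if_neg (by tauto), add_zero])]
                rw [PySem.List.foldl_add _
                      (fun v => (if v < PySem.Int.bxor v mask ∧ PySem.Int.bxor v mask ∈ xs then
                        pvC xs v * pvC xs (PySem.Int.bxor v mask) else 0)) acc,
                    ← List.sum_toFinset _ hknd])]
        rw [PySem.List.foldl_add _
              (fun mask => ∑ v ∈ ks.toFinset,
                (if v < PySem.Int.bxor v mask ∧ PySem.Int.bxor v mask ∈ xs then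
                  pvC xs v * pvC xs (PySem.Int.bxor v mask) else 0)) 0,
            ← List.sum_toFinset _ (pv_masks_nodup nbits k), zero_add]
        rw [← Finset.sum_product']
        rw [show (∑ p ∈ (pvMasks nbits k).toFinset ×ˢ ks.toFinset,
              (if p.2 < PySem.Int.bxor p.2 p.1 ∧ PySem.Int.bxor p.2 p.1 ∈ xs then
                pvC xs p.2 * pvC xs (PySem.Int.bxor p.2 p.1) else 0))
            = ∑ p ∈ ((pvMasks nbits k).toFinset ×ˢ ks.toFinset).filter
                (fun p => p.2 < PySem.Int.bxor p.2 p.1 ∧ PySem.Int.bxor p.2 p.1 ∈ xs),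
                pvC xs p.2 * pvC xs (PySem.Int.bxor p.2 p.1) from (Finset.sum_filter _ _).symm]
        apply Finset.sum_nbij' (fun p => (p.2, PySem.Int.bxor p.2 p.1))
          (fun q => (PySem.Int.bxor q.1 q.2, q.1))
        · intro p hp
          simp only [Finset.mem_filter, Finset.mem_product, List.mem_toFinset] at hp
          obtain ⟨⟨hm, hv⟩, hlt, hw⟩ := hp
          obtain ⟨hm0, hmlt, hmbc⟩ := (pv_masks_mem nbits k hknn p.1).mp hm
          have hv0 : 0 ≤ p.2 := (hxsb p.2 ((hksmem p.2).mp hv)).1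
          rw [hE]
          simp only [Finset.mem_filter, Finset.mem_product, List.mem_toFinset]
          refine ⟨⟨hv, (hksmem _).mpr hw⟩, hlt, ?_⟩
          rw [hxorc p.2 p.1 hv0 hm0, hmbc]
        · intro q hq
          rw [hE] at hq
          simp only [Finset.mem_filter, Finset.mem_product, List.mem_toFinset] at hq
          obtain ⟨⟨ha, hb⟩, hab, hbc⟩ := hq
          have ha0 : 0 ≤ q.1 := (hxsb q.1 ((hksmem q.1).mp ha)).1
          have hb0 : 0 ≤ q.2 := (hxsb q.2 ((hksmem q.2).mp hb)).1
          simp only [Finset.mem_filter, Finset.mem_product, List.mem_toFinset]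
          refine ⟨⟨?_, ha⟩, ?_, ?_⟩
          · apply (pv_masks_mem nbits k hknn _).mpr
            refine ⟨hxor0 q.1 q.2 ha0 hb0, ?_, hbc⟩
            rw [PySem.Int.bxor_of_nonneg ha0 hb0]
            simp only [Int.natAbs_natCast]
            have h1 : q.1.toNat < 2 ^ nbits := by
              have := hbit q.1 ha
              omega
            have h2 : q.2.toNat < 2 ^ nbits := by
              have := hbit q.2 hb
              omega
            exact Nat.xor_lt_two_pow h1 h2
          · rw [hxorc q.1 q.2 ha0 hb0]
            exact hab
          · rw [hxorc q.1 q.2 ha0 hb0]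
            exact (hksmem q.2).mp hb
        · intro p hp
          simp only [Finset.mem_filter, Finset.mem_product, List.mem_toFinset] at hp
          obtain ⟨⟨hm, hv⟩, hlt, hw⟩ := hp
          obtain ⟨hm0, hmlt, hmbc⟩ := (pv_masks_mem nbits k hknn p.1).mp hm
          have hv0 : 0 ≤ p.2 := (hxsb p.2 ((hksmem p.2).mp hv)).1
          have hcl : PySem.Int.bxor p.2 (PySem.Int.bxor p.2 p.1) = p.1 := hxorc p.2 p.1 hv0 hm0
          exact Prod.ext hcl rfl
        · intro q hq
          rw [hE] at hq
          simp only [Finset.mem_filter, Finset.mem_product, List.mem_toFinset] at hq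
          obtain ⟨⟨ha, hb⟩, hab, hbc⟩ := hq
          have ha0 : 0 ≤ q.1 := (hxsb q.1 ((hksmem q.1).mp ha)).1
          have hb0 : 0 ≤ q.2 := (hxsb q.2 ((hksmem q.2).mp hb)).1
          exact Prod.ext rfl (hxorc q.1 q.2 ha0 hb0)
        · intro p _
          rfl


-- ===== VERDICT (by name: the statement is the Claim_ definition above) =====
theorem kBitDifferencePairs_spec : Claim_equal_kBitDifferencePairs := by
  intro arr n k _hdom hpre
  unfold Pre_kBitDifferencePairs at hpre
  unfold Spec_kBitDifferencePairs
  exact pv_main arr n k hpre.1 hpre.2.1 hpre.2.2
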